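-- pv_equiv track=rewrite | github.com/jeshwanth-malluru/results | fix_supply_processing.py | remove_duplicate_subjects
-- ===== SOURCE A (Python) =====
-- def grade_hierarchy():
--     """Define grade hierarchy for comparison"""
--     return ['F', 'D', 'C', 'B', 'B+', 'A', 'A+', 'O']
--
-- def is_grade_better(current_grade, new_grade):
--     """Check if new grade is better than current grade"""
--     hierarchy = grade_hierarchy()
--     try:
--         current_index = hierarchy.index(current_grade)
--         new_index = hierarchy.index(new_grade)
--         return new_index > current_index
--     except ValueError:
--         return False
--
-- def normalize_subject_code(code):
--     """Normalize subject code by removing extra spaces and converting to uppercase"""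
--     if not code:
--         return ""
--     return str(code).strip().upper()
--
-- def remove_duplicate_subjects(subjects):
--     """Remove duplicate subjects based on subject code, keeping the best grade"""
--     if not subjects:
--         return []
--
--     # Group by normalized subject code
--     subject_groups = {}
--     for subject in subjects:
--         code = normalize_subject_code(subject.get('code', ''))
--         if code:
--             if code not in subject_groups:
--                 subject_groups[code] = []
--             subject_groups[code].append(subject)
--
--     # For each code, keep the subject with the best grade
--     deduplicated_subjects = []
--     for code, subject_list in subject_groups.items():
--         if len(subject_list) == 1:
--             deduplicated_subjects.append(subject_list[0])
--         else:
--             # Find the subject with the best grade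
--             best_subject = subject_list[0]
--             for subject in subject_list[1:]:
--                 current_grade = best_subject.get('grade', 'F')
--                 new_grade = subject.get('grade', 'F')
--                 if is_grade_better(current_grade, new_grade):
--                     best_subject = subject
--             deduplicated_subjects.append(best_subject)
--
--     return deduplicated_subjects
-- ===== SOURCE B (Python) =====
-- def grade_hierarchy():
--     """Define grade hierarchy for comparison"""
--     return ['F', 'D', 'C', 'B', 'B+', 'A', 'A+', 'O']
--
-- def is_grade_better(current_grade, new_grade):
--     """Check if new grade is better than current grade"""
--     hierarchy = grade_hierarchy()
--     try:
--         current_index = hierarchy.index(current_grade)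
--         new_index = hierarchy.index(new_grade)
--         return new_index > current_index
--     except ValueError:
--         return False
--
-- def normalize_subject_code(code):
--     """Normalize subject code by removing extra spaces and converting to uppercase"""
--     if not code:
--         return ""
--     return str(code).strip().upper()
--
-- def remove_duplicate_subjects(subjects):
--     """Single pass: keep, per normalized code, the best-graded subject seen so far."""
--     best_by_code = {}
--     for subject in subjects:
--         code = normalize_subject_code(subject.get('code', ''))
--         if not code:
--             continue
--         stored = best_by_code.get(code)
--         if stored is None or is_grade_better(stored.get('grade', 'F'), subject.get('grade', 'F')):
--             best_by_code[code] = subject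
--     return list(best_by_code.values())
-- ===== Notes on version B (the rewrite author's own statement) =====
-- stated objective: simpler
-- what changed: Replaces A's two-phase group-into-lists-then-reduce-each-group with a single streaming pass that keeps one best-so-far subject per normalized code in a dict and returns its values.
import Mathlib
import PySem

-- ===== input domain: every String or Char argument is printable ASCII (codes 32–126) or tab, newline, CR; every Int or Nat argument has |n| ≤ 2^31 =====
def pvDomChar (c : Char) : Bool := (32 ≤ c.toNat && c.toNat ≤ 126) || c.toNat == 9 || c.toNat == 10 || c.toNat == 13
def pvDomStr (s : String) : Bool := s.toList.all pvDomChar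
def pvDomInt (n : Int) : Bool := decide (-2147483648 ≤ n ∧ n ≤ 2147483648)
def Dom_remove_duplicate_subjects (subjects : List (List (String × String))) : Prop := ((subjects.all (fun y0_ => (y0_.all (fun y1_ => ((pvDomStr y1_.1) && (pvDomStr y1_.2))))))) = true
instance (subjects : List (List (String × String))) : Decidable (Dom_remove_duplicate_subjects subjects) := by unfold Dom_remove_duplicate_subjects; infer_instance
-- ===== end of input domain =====

-- B replaces A's two-phase "group subjects into per-code lists, then reduce each group"
-- with a single streaming pass keeping the best-so-far subject per code (simpler, same cost).


-- shared module helpers (used verbatim by both Pythons)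
def pvGradeHierarchy : List String := ["F", "D", "C", "B", "B+", "A", "A+", "O"]

def pvIsGradeBetter (current_grade new_grade : String) : Bool :=
  -- try: hierarchy.index twice, compare; except ValueError: False  (index? = none exactly where Python raises)
  match PySem.List.index? pvGradeHierarchy current_grade, PySem.List.index? pvGradeHierarchy new_grade with
  | some ci, some ni => ni > ci
  | _, _ => false

def pvNormalizeCode (code : String) : String :=
  if code = "" then "" else PySem.Str.upper (PySem.Str.strip code)

-- subject.get(k, dflt) on the association list (first match, Python dict semantics)
def pvSubjGet (subject : List (String × String)) (k dflt : String) : String :=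
  (PySem.Dict.mk subject).getD k dflt

-- ===== PORT A =====
-- inner reduction of A's phase 2: best_subject = subject_list[0]; for subject in subject_list[1:] …
-- ([] case is unreachable: every group A builds is nonempty — Python would raise IndexError there)
def pvBestLoop (subject_list : List (List (String × String))) : List (String × String) :=
  match subject_list with
  | [] => []
  | best :: rest =>
    rest.foldl (fun best_subject subject =>
      if pvIsGradeBetter (pvSubjGet best_subject "grade" "F") (pvSubjGet subject "grade" "F")
      then subject else best_subject) best

def remove_duplicate_subjects (subjects : List (List (String × String))) : List (List (String × String)) :=
  if subjects = [] then []
  else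
    -- phase 1: group by normalized subject code
    let subject_groups : PySem.Dict String (List (List (String × String))) :=
      subjects.foldl (fun d subject =>
        let code := pvNormalizeCode (pvSubjGet subject "code" "")
        if code ≠ "" then
          let d := if d.contains code then d else d.insert code []
          -- groups[code].append(subject): key is present, so in-place append = overwrite
          d.insert code (d.getD code [] ++ [subject])
        else d) PySem.Dict.empty
    -- phase 2: for each code keep the subject with the best grade
    subject_groups.items.foldl (fun deduplicated p =>
      if p.2.length = 1 then deduplicated ++ [p.2.headD []]
      else deduplicated ++ [pvBestLoop p.2]) []

-- ===== PORT B =====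
def remove_duplicate_subjects_alt (subjects : List (List (String × String))) : List (List (String × String)) :=
  (subjects.foldl (fun best_by_code subject =>
    let code := pvNormalizeCode (pvSubjGet subject "code" "")
    if code = "" then best_by_code
    else
      match best_by_code.get? code with
      | none => best_by_code.insert code subject
      | some stored =>
        if pvIsGradeBetter (pvSubjGet stored "grade" "F") (pvSubjGet subject "grade" "F")
        then best_by_code.insert code subject
        else best_by_code) (PySem.Dict.empty : PySem.Dict String (List (String × String)))).values

-- ===== PRECONDITION & SPEC =====
def Spec_remove_duplicate_subjects (subjects : List (List (String × String))) (out : List (List (String × String))) : Prop := out = remove_duplicate_subjects_alt subjects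
instance (subjects : List (List (String × String))) (out : List (List (String × String))) : Decidable (Spec_remove_duplicate_subjects subjects out) := by unfold Spec_remove_duplicate_subjects; infer_instance

-- ===== CLAIM (what is proved, stated in full; the proofs are below) =====
def Claim_equal_remove_duplicate_subjects : Prop := ∀ (subjects : List (List (String × String))), Dom_remove_duplicate_subjects subjects → Spec_remove_duplicate_subjects subjects (remove_duplicate_subjects subjects)

-- step functions of the two folds (verbatim the lambdas in the ports)
def pvStepA (d : PySem.Dict String (List (List (String × String)))) (subject : List (String × String)) : PySem.Dict String (List (List (String × String))) :=
  let code := pvNormalizeCode (pvSubjGet subject "code" "")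
  if code ≠ "" then
    let d := if d.contains code then d else d.insert code []
    d.insert code (d.getD code [] ++ [subject])
  else d

def pvStepB (best_by_code : PySem.Dict String (List (String × String))) (subject : List (String × String)) : PySem.Dict String (List (String × String)) :=
  let code := pvNormalizeCode (pvSubjGet subject "code" "")
  if code = "" then best_by_code
  else
    match best_by_code.get? code with
    | none => best_by_code.insert code subject
    | some stored =>
      if pvIsGradeBetter (pvSubjGet stored "grade" "F") (pvSubjGet subject "grade" "F")
      then best_by_code.insert code subject
      else best_by_code

-- the per-entry reduction B maintains incrementally
def pvF (p : String × List (List (String × String))) : String × List (String × String) :=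
  (p.1, pvBestLoop p.2)

theorem pvBestLoop_append (old : List (List (String × String))) (s : List (String × String)) (h : old ≠ []) :
    pvBestLoop (old ++ [s]) =
      if pvIsGradeBetter (pvSubjGet (pvBestLoop old) "grade" "F") (pvSubjGet s "grade" "F")
      then s else pvBestLoop old := by
  match old, h with
  | b :: t, _ => simp [pvBestLoop, List.foldl_append]

theorem pv_loop_inv (subjects : List (List (String × String)))
    (d1 : PySem.Dict String (List (List (String × String))))
    (d2 : PySem.Dict String (List (String × String)))
    (hnd : d1.keys.Nodup) (hne : ∀ p ∈ d1.items, p.2 ≠ [])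
    (hrel : d2.items = d1.items.map pvF) :
    (subjects.foldl pvStepA d1).keys.Nodup ∧
    (∀ p ∈ (subjects.foldl pvStepA d1).items, p.2 ≠ []) ∧
    (subjects.foldl pvStepB d2).items = (subjects.foldl pvStepA d1).items.map pvF := by
  induction subjects generalizing d1 d2 with
  | nil => exact ⟨hnd, hne, hrel⟩
  | cons s rest ih =>
    simp only [List.foldl_cons]
    have hkeys : d2.keys = d1.keys := by
      simp [PySem.Dict.keys, hrel, pvF, List.map_map, Function.comp]
    set code := pvNormalizeCode (pvSubjGet s "code" "") with hcode
    by_cases hc : code = ""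
    · have hA : pvStepA d1 s = d1 := by simp [pvStepA, ← hcode, hc]
      have hB : pvStepB d2 s = d2 := by simp [pvStepB, ← hcode, hc]
      rw [hA, hB]; exact ih d1 d2 hnd hne hrel
    · by_cases hcon : d1.contains code = true
      · -- key present: A appends to the group, B compares with the stored best
        obtain ⟨old, hold⟩ : ∃ old, d1.get? code = some old := by
          have := PySem.Dict.contains_eq_isSome_get? d1 code
          rw [hcon] at this
          exact Option.isSome_iff_exists.mp this.symm
        have holdmem : (code, old) ∈ d1.items :=
          (PySem.Dict.get?_eq_some_iff_mem_items d1 code old hnd).mp hold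
        have holdne : old ≠ [] := hne _ holdmem
        have hnd2 : d2.keys.Nodup := by rw [hkeys]; exact hnd
        have hget2 : d2.get? code = some (pvBestLoop old) := by
          apply PySem.Dict.get?_of_mem_items d2 _ hnd2
          rw [hrel]
          exact List.mem_map_of_mem holdmem
        have hA : pvStepA d1 s = d1.insert code (old ++ [s]) := by
          simp [pvStepA, ← hcode, hc, hcon, PySem.Dict.getD_of_get?_eq_some _ _ hold]
        have hcon2 : d2.contains code = true := by
          rw [PySem.Dict.contains_eq_isSome_get?, hget2]; rfl
        have hitems1 : (d1.insert code (old ++ [s])).items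
            = d1.items.map (fun p => if p.1 == code then (code, old ++ [s]) else p) :=
          PySem.Dict.items_insert_of_contains d1 _ hcon
        have hbl := pvBestLoop_append old s holdne
        have hnd' : (d1.insert code (old ++ [s])).keys.Nodup :=
          PySem.Dict.nodup_keys_insert d1 code (old ++ [s]) hnd
        have hne' : ∀ p ∈ (d1.insert code (old ++ [s])).items, p.2 ≠ [] := by
          rw [hitems1]
          intro p hp
          obtain ⟨q, hq, hqe⟩ := List.mem_map.mp hp
          by_cases hq1 : q.1 == code
          · simp [hq1] at hqe; subst hqe; simp
          · simp [hq1] at hqe; subst hqe; exact hne q hq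
        have hrel' : (pvStepB d2 s).items = (d1.insert code (old ++ [s])).items.map pvF := by
          rw [hitems1]
          by_cases hbetter : pvIsGradeBetter (pvSubjGet (pvBestLoop old) "grade" "F") (pvSubjGet s "grade" "F") = true
          · have hB : pvStepB d2 s = d2.insert code s := by
              simp [pvStepB, ← hcode, hc, hget2, hbetter]
            rw [hB, PySem.Dict.items_insert_of_contains d2 s hcon2, hrel,
              List.map_map, List.map_map]
            apply List.map_congr_left
            intro p _
            by_cases hp1 : p.1 == code
            · simp [Function.comp, pvF, hp1, hbl, hbetter]
            · simp [Function.comp, pvF, hp1]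
          · have hB : pvStepB d2 s = d2 := by
              simp [pvStepB, ← hcode, hc, hget2, hbetter]
            rw [hB, hrel, List.map_map]
            apply List.map_congr_left
            intro p hp
            by_cases hp1 : p.1 == code
            · have hp1' : p.1 = code := by simpa using hp1
              have hpv : p.2 = old := by
                have h2 : d1.get? p.1 = some p.2 :=
                  PySem.Dict.get?_of_mem_items d1 hp hnd
                rw [hp1', hold] at h2
                exact (Option.some_inj.mp h2).symm
              simp [Function.comp, pvF, hp1', hpv, hbl, hbetter]
            · simp [Function.comp, pvF, hp1]
        rw [hA] at *
        exact ih _ _ hnd' hne' hrel'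
      · -- new key: both append a fresh entry
        have hcon' : d1.contains code = false := by simpa using hcon
        have hnotmem : code ∉ d1.keys := by
          intro hm
          exact hcon ((PySem.Dict.contains_iff_mem_keys d1 code).mpr hm)
        have hA : pvStepA d1 s = (d1.insert code []).insert code ([] ++ [s]) := by
          simp [pvStepA, ← hcode, hc, hcon', PySem.Dict.getD_insert_self]
        have hitems1 : ((d1.insert code []).insert code ([] ++ [s])).items = d1.items ++ [(code, [s])] := by
          rw [PySem.Dict.items_insert_of_contains _ _ (PySem.Dict.contains_insert_self d1 code []),
            PySem.Dict.items_insert_of_not_contains d1 [] hcon']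
          rw [List.map_append]
          congr 1
          · apply List.map_congr_left ?_ |>.trans (List.map_id _)
            intro p hp
            have : p.1 ≠ code := by
              intro h; exact hnotmem (h ▸ List.mem_map_of_mem hp)
            simp [this]
          · simp
        have hcon2 : d2.contains code = false := by
          rw [show d2.contains code = decide (code ∈ d2.keys) from
            PySem.Dict.contains_eq_decide_mem_keys d2 code, hkeys]
          simpa using hnotmem
        have hget2 : d2.get? code = none := by
          have := PySem.Dict.contains_eq_isSome_get? d2 code
          rw [hcon2] at this
          exact Option.not_isSome_iff_eq_none.mp (by rw [← this]; simp)
        have hB : pvStepB d2 s = d2.insert code s := by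
          simp [pvStepB, ← hcode, hc, hget2]
        have hnd' : (pvStepA d1 s).keys.Nodup := by
          rw [hA]
          exact PySem.Dict.nodup_keys_insert _ _ _ (PySem.Dict.nodup_keys_insert _ _ _ hnd)
        have hne' : ∀ p ∈ (pvStepA d1 s).items, p.2 ≠ [] := by
          rw [hA, hitems1]
          intro p hp
          rcases List.mem_append.mp hp with h | h
          · exact hne p h
          · simp at h; subst h; simp
        have hrel' : (pvStepB d2 s).items = (pvStepA d1 s).items.map pvF := by
          rw [hA, hB, hitems1, PySem.Dict.items_insert_of_not_contains d2 s hcon2, hrel,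
            List.map_append]
          rfl
        exact ih _ _ hnd' hne' hrel'

-- ===== VERDICT (by name: the statement is the Claim_ definition above) =====
theorem remove_duplicate_subjects_spec : Claim_equal_remove_duplicate_subjects := by
  intro subjects _
  unfold Spec_remove_duplicate_subjects
  by_cases hnil : subjects = []
  · subst hnil; rfl
  · obtain ⟨hnd, hne, hrel⟩ := pv_loop_inv subjects PySem.Dict.empty PySem.Dict.empty
      (by simp [PySem.Dict.keys_empty]) (by simp [PySem.Dict.empty]) rfl
    show remove_duplicate_subjects subjects = remove_duplicate_subjects_alt subjects
    unfold remove_duplicate_subjects remove_duplicate_subjects_alt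
    rw [if_neg hnil]
    rw [show (fun (d : PySem.Dict String (List (List (String × String)))) subject =>
        let code := pvNormalizeCode (pvSubjGet subject "code" "")
        if code ≠ "" then
          let d := if d.contains code then d else d.insert code []
          d.insert code (d.getD code [] ++ [subject])
        else d) = pvStepA from rfl]
    rw [show (fun (d : PySem.Dict String (List (String × String))) subject =>
        let code := pvNormalizeCode (pvSubjGet subject "code" "")
        if code = "" then d
        else
          match d.get? code with
          | none => d.insert code subject
          | some stored =>
            if pvIsGradeBetter (pvSubjGet stored "grade" "F") (pvSubjGet subject "grade" "F")
            then d.insert code subject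
            else d) = pvStepB from rfl]
    rw [PySem.List.foldl_congr_mem _ _ (fun acc p => acc ++ [pvBestLoop p.2]) []
      (by
        intro acc p hp
        have hpne := hne p hp
        by_cases hlen : p.2.length = 1
        · obtain ⟨x, hx⟩ := List.length_eq_one_iff.mp hlen
          simp [hx, pvBestLoop]
        · simp [hlen])]
    rw [PySem.List.foldl_append_singleton_eq_map (fun p : String × List (List (String × String)) => pvBestLoop p.2) _ []]
    rw [PySem.Dict.values, hrel, List.map_map]
    rfl
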